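-- pv_equiv track=rewrite | github.com/laze44/distIR | mercury/search/search.py | _build_virtual_mesh_shape
-- ===== SOURCE A (Python) =====
-- from typing import Callable, Dict, Iterator, List, Optional, Tuple
--
-- def _build_virtual_mesh_shape(
--     factor_list: List[int],
-- ) -> Tuple[Tuple[int, ...], List[Tuple[int, int]]]:
--     """Build a virtual mesh shape and axis assignment from factor list.
--
--     Given a factor list (one per axis), constructs a virtual mesh shape
--     containing only the non-1 factors, and returns the corresponding
--     mesh assignment list for ``parallelize`` calls.
--
--     Returns:
--         (virtual_mesh_shape, assignment_list) where assignment_list has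
--         one ``(start_dim, num_dims)`` entry per axis.
--     """
--     virtual_dims: List[int] = []
--     assign: List[Tuple[int, int]] = []
--     dim_offset = 0
--
--     for factor in factor_list:
--         if factor > 1:
--             virtual_dims.append(factor)
--             assign.append((dim_offset, 1))
--             dim_offset += 1
--         else:
--             assign.append((0, 0))
--
--     return tuple(virtual_dims) if virtual_dims else (1,), assign
-- ===== SOURCE B (Python) =====
-- def _build_virtual_mesh_shape(factor_list):
--     # Pass 1: the virtual mesh shape is just the non-1 factors.
--     virtual_dims = tuple(f for f in factor_list if f > 1)
--     # Pass 2: exclusive prefix-count table of the predicate f > 1.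
--     offsets = []
--     off = 0
--     for f in factor_list:
--         offsets.append(off)
--         off += 1 if f > 1 else 0
--     # Pass 3: mapping pass using the table.
--     assign = [(offsets[i], 1) if f > 1 else (0, 0) for i, f in enumerate(factor_list)]
--     return (virtual_dims if virtual_dims else (1,)), assign
-- ===== Notes on version B (the rewrite author's own statement) =====
-- stated objective: alternative
-- what changed: Replaces A's single accumulator-threaded loop by three independent passes: a filter for the shape, an exclusive prefix-count table of f>1, and a mapping pass reading that table.
import Mathlib
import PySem

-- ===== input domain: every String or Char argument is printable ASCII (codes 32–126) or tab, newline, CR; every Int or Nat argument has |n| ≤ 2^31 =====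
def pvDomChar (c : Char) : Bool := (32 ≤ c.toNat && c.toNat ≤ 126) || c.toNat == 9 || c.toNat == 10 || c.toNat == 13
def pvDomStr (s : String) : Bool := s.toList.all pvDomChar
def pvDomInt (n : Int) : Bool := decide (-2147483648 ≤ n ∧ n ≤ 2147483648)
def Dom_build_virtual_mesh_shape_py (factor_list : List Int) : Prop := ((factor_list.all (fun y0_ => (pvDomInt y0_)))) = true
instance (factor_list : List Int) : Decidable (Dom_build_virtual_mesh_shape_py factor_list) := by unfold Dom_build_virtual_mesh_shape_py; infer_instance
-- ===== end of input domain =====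

-- B replaces A's single accumulator-threaded loop by three independent passes
-- (filter, exclusive prefix-count table, mapping pass); alternative decomposition, same cost.

-- ===== PORT A =====
-- one foldl over factor_list threading (virtual_dims, assign, dim_offset), as in A
def build_virtual_mesh_shape_py (factor_list : List Int) : List Int × (List (Int × Int)) :=
  let s := factor_list.foldl
    (fun (st : List Int × List (Int × Int) × Int) factor =>
      if factor > 1 then (st.1 ++ [factor], st.2.1 ++ [(st.2.2, 1)], st.2.2 + 1)
      else (st.1, st.2.1 ++ [((0 : Int), (0 : Int))], st.2.2))
    ([], [], 0)
  (if s.1 = [] then [1] else s.1, s.2.1)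

-- ===== PORT B =====
def build_virtual_mesh_shape_py_alt (factor_list : List Int) : List Int × (List (Int × Int)) :=
  -- pass 1: virtual_dims = the non-1 factors
  let virtual_dims := factor_list.filter (fun f => f > 1)
  -- pass 2: exclusive prefix-count table of the predicate f > 1
  let t := factor_list.foldl
    (fun (st : List Int × Int) f =>
      (st.1 ++ [st.2], st.2 + (if f > 1 then 1 else 0)))
    ([], 0)
  let offsets := t.1
  -- pass 3: mapping pass reading the table (enumerate+index ported as zip)
  let assign := (factor_list.zip offsets).map
    (fun p => if p.1 > 1 then (p.2, (1 : Int)) else ((0 : Int), (0 : Int)))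
  (if virtual_dims = [] then [1] else virtual_dims, assign)

-- ===== PRECONDITION & SPEC =====
def Spec_build_virtual_mesh_shape_py (factor_list : List Int) (out : List Int × (List (Int × Int))) : Prop := out = build_virtual_mesh_shape_py_alt factor_list
instance (factor_list : List Int) (out : List Int × (List (Int × Int))) : Decidable (Spec_build_virtual_mesh_shape_py factor_list out) := by unfold Spec_build_virtual_mesh_shape_py; infer_instance

-- ===== CLAIM (what is proved, stated in full; the proofs are below) =====
def Claim_equal_build_virtual_mesh_shape_py : Prop := ∀ (factor_list : List Int), Dom_build_virtual_mesh_shape_py factor_list → Spec_build_virtual_mesh_shape_py factor_list (build_virtual_mesh_shape_py factor_list)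

-- ===== LEMMAS AND PROOFS =====

-- direct recursive descriptions of the assignment list, the offset table and the count
def pvAssignOf (off : Int) : List Int → List (Int × Int)
  | [] => []
  | f :: t => if f > 1 then (off, 1) :: pvAssignOf (off + 1) t else (0, 0) :: pvAssignOf off t

def pvOffs (off : Int) : List Int → List Int
  | [] => []
  | f :: t => off :: pvOffs (off + (if f > 1 then 1 else 0)) t

def pvCnt : List Int → Int
  | [] => 0
  | f :: t => (if f > 1 then 1 else 0) + pvCnt t

lemma foldlA_eq (l : List Int) : ∀ (vd : List Int) (a : List (Int × Int)) (off : Int),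
    l.foldl (fun (st : List Int × List (Int × Int) × Int) factor =>
      if factor > 1 then (st.1 ++ [factor], st.2.1 ++ [(st.2.2, 1)], st.2.2 + 1)
      else (st.1, st.2.1 ++ [((0 : Int), (0 : Int))], st.2.2)) (vd, a, off)
    = (vd ++ l.filter (fun f => f > 1), a ++ pvAssignOf off l, off + pvCnt l) := by
  induction l with
  | nil => intro vd a off; simp [pvAssignOf, pvCnt]
  | cons f t ih =>
    intro vd a off
    by_cases h : f > 1 <;>
      simp [List.foldl, h, ih, pvAssignOf, pvCnt, List.filter_cons, List.append_assoc] <;> ring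

lemma foldlB_eq (l : List Int) : ∀ (os : List Int) (off : Int),
    l.foldl (fun (st : List Int × Int) f =>
      (st.1 ++ [st.2], st.2 + (if f > 1 then 1 else 0))) (os, off)
    = (os ++ pvOffs off l, off + pvCnt l) := by
  induction l with
  | nil => intro os off; simp [pvOffs, pvCnt]
  | cons f t ih =>
    intro os off
    by_cases h : f > 1 <;>
      simp [List.foldl, h, ih, pvOffs, pvCnt, List.append_assoc] <;> ring

lemma zip_offs_eq (l : List Int) : ∀ (off : Int),
    (l.zip (pvOffs off l)).map
      (fun p => if p.1 > 1 then (p.2, (1 : Int)) else ((0 : Int), (0 : Int)))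
    = pvAssignOf off l := by
  induction l with
  | nil => intro off; simp [pvOffs, pvAssignOf]
  | cons f t ih =>
    intro off
    by_cases h : f > 1 <;> simp [pvOffs, pvAssignOf, h, ih]

-- ===== VERDICT (by name: the statement is the Claim_ definition above) =====
theorem build_virtual_mesh_shape_py_spec : Claim_equal_build_virtual_mesh_shape_py := by
  intro l _
  unfold Spec_build_virtual_mesh_shape_py build_virtual_mesh_shape_py build_virtual_mesh_shape_py_alt
  simp only [foldlA_eq, foldlB_eq, List.nil_append, zip_offs_eq]
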